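-- pv_equiv track=rewrite | github.com/LEEHYUNDONG/codingTest | codingTest_python/programmers/numberGame.py | solution
-- ===== SOURCE A (Python) =====
-- def solution(A, B):
--     answer = 0
--     A.sort(reverse=True)
--     B.sort(reverse=True)
--     for num in A:
--         if num >= B[0]:
--             continue
--         else:
--             answer += 1
--             B.pop(0)
--
--     return answer
-- ===== SOURCE B (Python) =====
-- def solution(A, B):
--     # Ascending two-pointer: walk B's sorted values once, advancing an index
--     # into sorted A instead of popping from the front of B (O(n log n)).
--     a = sorted(A)
--     b = sorted(B)
--     answer = 0
--     i = 0  # pointer into a: next A-element still to beat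
--     for x in b:
--         if i < len(a) and x > a[i]:
--             answer += 1
--             i += 1
--     return answer
-- ===== Notes on version B (the rewrite author's own statement) =====
-- stated objective: faster
-- what changed: A pops from the front of the descending-sorted B inside its loop over descending-sorted A (each pop shifts the list); B sorts both lists ascending once and walks B with a single index pointer into A, no mutation and no pops.
-- outside the precondition, e.g. on solution([5, 0], [3]): A returns 1, B returns 1; on solution([1], []): A raises IndexError, B returns 0
import Mathlib
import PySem

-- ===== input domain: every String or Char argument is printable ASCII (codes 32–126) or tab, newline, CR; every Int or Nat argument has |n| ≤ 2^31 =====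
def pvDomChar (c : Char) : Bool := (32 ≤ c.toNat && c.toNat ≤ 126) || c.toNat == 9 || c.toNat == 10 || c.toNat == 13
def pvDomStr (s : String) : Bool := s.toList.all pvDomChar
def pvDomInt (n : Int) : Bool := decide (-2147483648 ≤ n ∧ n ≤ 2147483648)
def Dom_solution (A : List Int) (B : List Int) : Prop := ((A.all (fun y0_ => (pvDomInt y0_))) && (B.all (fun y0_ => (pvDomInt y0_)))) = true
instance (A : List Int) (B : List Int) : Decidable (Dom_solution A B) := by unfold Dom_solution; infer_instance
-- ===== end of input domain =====

-- B replaces A's in-loop pop(0) on the descending-sorted B by a single ascending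
-- two-pointer pass (asymptotically faster); equivalence is about the RETURN value
-- only: Python A sorts both argument lists in place, B does not mutate them.

-- ===== PORT A =====
-- loop body of A's 'for num in A': state = (answer, current B list);
-- B[0] on empty B raises IndexError in Python (excluded by Pre_), here the state is kept.
def solStepA (st : Int × List Int) (num : Int) : Int × List Int :=
  match PySem.List.pyGet? st.2 0 with
  | none => st
  | some h =>
      if num ≥ h then st
      else (st.1 + 1, match PySem.List.pop? st.2 0 with
                      | none => st.2
                      | some r => r.2)

def solution (A : List Int) (B : List Int) : Int :=
  let A' := PySem.List.sorted A (fun x => x) true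
  let B' := PySem.List.sorted B (fun x => x) true
  (A'.foldl solStepA (0, B')).1

-- ===== PORT B =====
-- loop body of B's 'for x in b': state = (answer, pointer i into a)
def solStepB (a : List Int) (st : Int × Int) (x : Int) : Int × Int :=
  if st.2 < (a.length : Int) ∧ PySem.List.pyGetD a st.2 0 < x then (st.1 + 1, st.2 + 1) else st

def solution_alt (A : List Int) (B : List Int) : Int :=
  let a := PySem.List.sorted A (fun x => x) false
  let b := PySem.List.sorted B (fun x => x) false
  (b.foldl (solStepB a) (0, 0)).1

-- ===== PRECONDITION & SPEC =====
-- Pre_ excludes len(B) < len(A): there A can exhaust B and raise IndexError at B[0]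
-- (it also excludes some inputs where A happens to return before exhausting B; see cites).
def Pre_solution (A : List Int) (B : List Int) : Prop := A.length ≤ B.length
instance (A : List Int) (B : List Int) : Decidable (Pre_solution A B) := by unfold Pre_solution; infer_instance
def pvWitness_solution : List Int × List Int := ([1, 2], [2, 3])

def Spec_solution (A : List Int) (B : List Int) (out : Int) : Prop := out = solution_alt A B
instance (A : List Int) (B : List Int) (out : Int) : Decidable (Spec_solution A B out) := by unfold Spec_solution; infer_instance

-- ===== CLAIM (what is proved, stated in full; the proofs are below) =====
def Claim_equal_solution : Prop := ∀ (A : List Int) (B : List Int), Dom_solution A B → Pre_solution A B → Spec_solution A B (solution A B)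

-- ===== LEMMAS AND PROOFS =====

-- A's loop as a pure recursion on (A desc, B desc)
def dg : List Int → List Int → Int
  | [], _ => 0
  | _ :: as_, [] => dg as_ []
  | a :: as_, h :: t => if a ≥ h then dg as_ (h :: t) else 1 + dg as_ t

-- B's loop as a pure recursion: pointer list (rest of a asc) vs B asc
def ag : List Int → List Int → Int
  | _, [] => 0
  | [], _ :: bs => ag [] bs
  | y :: ys, x :: bs => if y < x then 1 + ag ys bs else ag (y :: ys) bs

theorem ag_nil : ∀ bs, ag [] bs = 0
  | [] => rfl
  | _ :: bs => ag_nil bs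

theorem foldA : ∀ (as_ b : List Int) (ans : Int),
    (as_.foldl solStepA (ans, b)).1 = ans + dg as_ b := by
  intro as_
  induction as_ with
  | nil => intro b ans; simp [dg]
  | cons a as_ ih =>
    intro b ans
    cases b with
    | nil => simp [List.foldl, solStepA, PySem.List.pyGet?, dg, ih]
    | cons h t =>
      simp only [List.foldl, solStepA, PySem.List.pyGet?_zero_cons, PySem.List.pop?_zero_cons, dg]
      by_cases hc : a ≥ h
      · simp [hc, ih]
      · simp [hc, ih]
        omega

theorem foldB : ∀ (a : List Int) (bs : List Int) (ans : Int) (i : Nat), i ≤ a.length →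
    (bs.foldl (solStepB a) (ans, (i : Int))).1 = ans + ag (a.drop i) bs := by
  intro a bs
  induction bs generalizing a with
  | nil => intro ans i _; simp [ag]
  | cons x bs ih =>
    intro ans i hi
    rcases Nat.lt_or_ge i a.length with hlt | hge
    · have hdrop : a.drop i = a[i] :: a.drop (i + 1) := List.drop_eq_getElem_cons hlt
      have hget : PySem.List.pyGetD a (i : Int) 0 = a[i] := by
        rw [PySem.List.pyGetD_natCast]; exact List.getD_eq_getElem _ _ hlt
      simp only [List.foldl, solStepB, hget, hdrop, ag]
      by_cases hc : a[i] < x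
      · have hcond : ((i : Int) < (a.length : Int) ∧ a[i] < x) := ⟨by exact_mod_cast hlt, hc⟩
        rw [if_pos hcond]
        have : ((i : Int) + 1) = ((i + 1 : Nat) : Int) := by push_cast; ring
        rw [this, if_pos hc, ih a (ans + 1) (i + 1) hlt]
        omega
      · have hcond : ¬ ((i : Int) < (a.length : Int) ∧ a[i] < x) := by
          intro h; exact hc h.2
        rw [if_neg hcond, if_neg hc, ih a ans i hi, hdrop]
    · have hlen : i = a.length := le_antisymm hi hge
      have hdrop : a.drop i = [] := by simp [hlen]
      have hcond : ¬ ((i : Int) < (a.length : Int) ∧ PySem.List.pyGetD a (i : Int) 0 < x) := by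
        intro h; omega
      simp only [List.foldl, solStepB, if_neg hcond]
      rw [ih a ans i hi, hdrop, ag_nil, ag_nil]

-- appending a value m dominating all of bs at the end of the pointer list changes nothing
theorem agL1 : ∀ (bs xs : List Int) (m : Int), (∀ b ∈ bs, b ≤ m) →
    ag (xs ++ [m]) bs = ag xs bs := by
  intro bs
  induction bs with
  | nil => intro xs m _; simp [ag]
  | cons b bs ih =>
    intro xs m hm
    cases xs with
    | nil =>
      have hb : ¬ (m < b) := not_lt.mpr (hm b (List.mem_cons_self))
      have h2 := ih [] m (fun y hy => hm y (List.mem_cons_of_mem _ hy))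
      simp only [List.nil_append] at h2
      simp [ag, hb, ag_nil, h2]
    | cons y ys =>
      simp only [List.cons_append, ag]
      by_cases hc : y < b
      · rw [if_pos hc, if_pos hc, ih ys m (fun z hz => hm z (List.mem_cons_of_mem _ hz))]
      · rw [if_neg hc, if_neg hc]
        exact ih (y :: ys) m (fun z hz => hm z (List.mem_cons_of_mem _ hz))

-- appending a winning pair (a0 at the end of a, b0 > a0 at the end of b) adds exactly one
theorem agL2 : ∀ (bs xs : List Int) (a0 b0 : Int), (∀ x ∈ xs, x ≤ a0) → a0 < b0 →
    ag (xs ++ [a0]) (bs ++ [b0]) = 1 + ag xs bs := by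
  intro bs
  induction bs with
  | nil =>
    intro xs a0 b0 hx hab
    cases xs with
    | nil => simp [ag, hab]
    | cons y ys =>
      have hy : y < b0 := lt_of_le_of_lt (hx y (List.mem_cons_self)) hab
      simp [ag, hy]
  | cons b bs ih =>
    intro xs a0 b0 hx hab
    cases xs with
    | nil =>
      by_cases hc : a0 < b
      · simp [ag, hc, ag_nil]
      · have h2 := ih [] a0 b0 (by simp) hab
        simp only [List.nil_append] at h2
        simp [ag, hc, ag_nil, h2]
    | cons y ys =>
      simp only [List.cons_append, ag]
      by_cases hc : y < b
      · rw [if_pos hc, if_pos hc,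
            ih ys a0 b0 (fun z hz => hx z (List.mem_cons_of_mem _ hz)) hab]
      · rw [if_neg hc, if_neg hc]
        exact ih (y :: ys) a0 b0 hx hab

-- main: the descending greedy equals the ascending two-pointer on the reversed lists
theorem dg_eq_ag : ∀ (Ad Bd : List Int),
    Ad.Pairwise (fun x y => y ≤ x) → Bd.Pairwise (fun x y => y ≤ x) →
    Ad.length ≤ Bd.length →
    dg Ad Bd = ag Ad.reverse Bd.reverse := by
  intro Ad
  induction Ad with
  | nil => intro Bd _ _ _; simp [dg, ag_nil]
  | cons a as_ ih =>
    intro Bd hA hB hlen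
    cases Bd with
    | nil => simp at hlen
    | cons h t =>
      have hA' := (List.pairwise_cons.mp hA)
      have hB' := (List.pairwise_cons.mp hB)
      simp only [List.reverse_cons, dg]
      by_cases hc : a ≥ h
      · rw [if_pos hc,
            agL1 (t.reverse ++ [h]) as_.reverse a (by
              intro z hz
              rcases List.mem_append.mp hz with hz1 | hz2
              · exact le_trans (hB'.1 z (List.mem_reverse.mp hz1)) hc
              · simp at hz2; omega),
            ih (h :: t) hA'.2 hB (by simp at hlen ⊢; omega)]
        simp
      · rw [if_neg hc,
            agL2 t.reverse as_.reverse a h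
              (fun z hz => hA'.1 z (List.mem_reverse.mp hz)) (by omega),
            ih t hA'.2 hB'.2 (by simp at hlen ⊢; omega)]

-- ascending sort is the reverse of Python's descending sort (Int values, identity key)
theorem sorted_asc_eq_reverse_desc (l : List Int) :
    PySem.List.sorted l (fun x => x) false = (PySem.List.sorted l (fun x => x) true).reverse := by
  have hperm : (PySem.List.sorted l (fun x => x) false).Perm
      ((PySem.List.sorted l (fun x => x) true).reverse) :=
    (PySem.List.sorted_perm l (fun x => x) false).trans
      (((List.reverse_perm _).trans (PySem.List.sorted_perm l (fun x => x) true)).symm)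
  have h1 : (PySem.List.sorted l (fun x => x) false).Pairwise (· ≤ ·) := by
    simpa using PySem.List.sorted_pairwise l (fun x => x)
  have h2 : ((PySem.List.sorted l (fun x => x) true).reverse).Pairwise (· ≤ ·) := by
    rw [List.pairwise_reverse]
    simpa using PySem.List.sorted_pairwise_rev l (fun x => x)
  exact hperm.eq_of_pairwise (fun a b _ _ hab hba => le_antisymm hab hba) h1 h2

-- ===== VERDICT (by name: the statement is the Claim_ definition above) =====
theorem solution_spec : Claim_equal_solution := by
  intro A B _ hpre
  unfold Spec_solution
  simp only [solution, solution_alt]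
  have h1 := foldA (PySem.List.sorted A (fun x => x) true) (PySem.List.sorted B (fun x => x) true) 0
  have h2 := foldB (PySem.List.sorted A (fun x => x) false) (PySem.List.sorted B (fun x => x) false) 0 0 (Nat.zero_le _)
  simp only [Nat.cast_zero, List.drop_zero] at h2
  rw [h1, h2]
  simp only [zero_add]
  rw [sorted_asc_eq_reverse_desc A, sorted_asc_eq_reverse_desc B]
  exact dg_eq_ag _ _
    (by simpa using PySem.List.sorted_pairwise_rev A (fun x => x))
    (by simpa using PySem.List.sorted_pairwise_rev B (fun x => x))
    (by simpa [PySem.List.length_sorted] using hpre)
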